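-- pv_equiv track=rewrite | github.com/kunaldineshpatil/eyrc22_PB_1761 | PB_Task1_Windows/Task1A/task_1a.py | label_missing_vertical_lines
-- ===== SOURCE A (Python) =====
-- def label_nodes(centre_point):
--
-- 	"""
-- 	Purpose:
-- 	---
-- 	This function takes the coordinates of a node as an argument and returns a string
-- 	which is the label of the node present in the image
--
-- 	Input Arguments:
-- 	---
-- 	`centre_point` :	[ tuple ]
-- 			tuple containing x and y coordinate of the node
-- 	Returns:
-- 	---
-- 	`label` : [ string ]
-- 			string containing label of the node
--
-- 	Example call:
-- 	---
-- 	traffic_signals.append(label_nodes(t))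
-- 	"""
-- 	label=''
-- 	if( (centre_point[0]==100)  |  ((centre_point[0]>90)&(centre_point[0]<110)) ):
-- 			label=label+'A'
-- 	elif( (centre_point[0]==200)  |  ((centre_point[0]>190)&(centre_point[0]<210)) ):
-- 			label=label+'B'
-- 	elif( (centre_point[0]==300)  |  ((centre_point[0]>290)&(centre_point[0]<310)) ):
-- 			label=label+'C'
-- 	elif( (centre_point[0]==400)  |  ((centre_point[0]>390)&(centre_point[0]<410)) ):
-- 			label=label+'D'
-- 	elif( (centre_point[0]==500)  |  ((centre_point[0]>490)&(centre_point[0]<510)) ):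
-- 			label=label+'E'
-- 	elif( (centre_point[0]==600)  |  ((centre_point[0]>590)&(centre_point[0]<610)) ):
-- 			label=label+'F'
-- 	elif( (centre_point[0]==700)  |  ((centre_point[0]>690)&(centre_point[0]<710)) ):
-- 			label=label+'G'
-- 	label=label+str(int(centre_point[1]/100))
-- 	return label
--
-- def label_missing_vertical_lines(Lines):
--
--     """
-- 	Purpose:
-- 	---
-- 	This function takes the set of missing lines in all the columns as an argument
--  	and returns a list with the labelled missing lines
--
-- 	Input Arguments:
-- 	---
-- 	`Lines` :	[ dictionary ]
-- 			dictionary containing x coordinates as keys and list of tuples(coordinates) of gaps as values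
-- 	Returns:
-- 	---
-- 	`ans` : [ list of strings ]
-- 			list of all the missing lines labelled
--
-- 	Example call:
-- 	---
-- 	ans=label_missing_vertical_lines(Lines)
-- 	"""
--     ans=[]
--     for column,missing_lines in Lines.items():
--         for g in missing_lines:
--             s1=label_nodes((column,g[0]+10))
--             s2=label_nodes((column,g[1]+10))
--             s=s1+'-'+s2
--             ans.append(s)
--     return ans
-- ===== SOURCE B (Python) =====
-- def label_missing_vertical_lines(Lines):
--     def node(x, y):
--         k = (x + 50) // 100  # nearest hundred
--         letter = chr(ord('A') + k - 1) if 1 <= k <= 7 and abs(x - 100 * k) < 10 else ''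
--         return letter + str(int(y / 100))
--     return [node(column, g[0] + 10) + '-' + node(column, g[1] + 10)
--             for column, missing_lines in Lines.items() for g in missing_lines]
-- ===== Notes on version B (the rewrite author's own statement) =====
-- stated objective: simpler
-- what changed: The seven-branch if-elif column-to-letter chain is replaced by a closed-form arithmetic mapping (nearest hundred k=(x+50)//100, letter chr(ord('A')+k-1) iff 1<=k<=7 and |x-100k|<10), and the accumulator loops become a single comprehension.
import Mathlib
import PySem

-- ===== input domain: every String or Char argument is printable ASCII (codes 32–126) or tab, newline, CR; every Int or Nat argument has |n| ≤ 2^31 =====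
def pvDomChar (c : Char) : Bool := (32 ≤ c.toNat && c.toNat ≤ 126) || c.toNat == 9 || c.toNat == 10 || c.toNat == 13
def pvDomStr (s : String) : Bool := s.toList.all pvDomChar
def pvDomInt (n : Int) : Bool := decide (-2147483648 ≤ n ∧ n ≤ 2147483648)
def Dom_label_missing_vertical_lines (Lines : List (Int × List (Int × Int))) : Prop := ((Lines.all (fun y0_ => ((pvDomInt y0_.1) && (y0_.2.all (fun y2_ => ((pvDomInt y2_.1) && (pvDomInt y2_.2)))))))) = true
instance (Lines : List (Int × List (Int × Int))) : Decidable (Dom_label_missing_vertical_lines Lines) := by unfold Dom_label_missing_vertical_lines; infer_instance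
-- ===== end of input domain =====

-- B replaces A's seven-branch if-elif column→letter chain by one closed-form arithmetic
-- mapping (nearest hundred) and the accumulator loops by a comprehension (objective: simpler).

-- ===== PORT A =====
-- label_nodes: the if-elif chain; `int(y/100)` is exact truncating division (Int.tdiv)
-- for the integer magnitudes of Dom (the double rounding error of y/100 is far below 1/100).
def pvLabelNodes (cp : Int × Int) : String :=
  let label := ""
  let label :=
    if cp.1 = 100 ∨ (cp.1 > 90 ∧ cp.1 < 110) then label ++ "A"
    else if cp.1 = 200 ∨ (cp.1 > 190 ∧ cp.1 < 210) then label ++ "B"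
    else if cp.1 = 300 ∨ (cp.1 > 290 ∧ cp.1 < 310) then label ++ "C"
    else if cp.1 = 400 ∨ (cp.1 > 390 ∧ cp.1 < 410) then label ++ "D"
    else if cp.1 = 500 ∨ (cp.1 > 490 ∧ cp.1 < 510) then label ++ "E"
    else if cp.1 = 600 ∨ (cp.1 > 590 ∧ cp.1 < 610) then label ++ "F"
    else if cp.1 = 700 ∨ (cp.1 > 690 ∧ cp.1 < 710) then label ++ "G"
    else label
  label ++ PySem.Int.toStr (Int.tdiv cp.2 100)

def label_missing_vertical_lines (Lines : List (Int × List (Int × Int))) : List String :=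
  Lines.foldl (fun ans cm =>
    cm.2.foldl (fun ans g =>
      let s1 := pvLabelNodes (cm.1, g.1 + 10)
      let s2 := pvLabelNodes (cm.1, g.2 + 10)
      let s := s1 ++ "-" ++ s2
      ans ++ [s]) ans) []

-- ===== PORT B =====
-- Source B's node helper: closed-form letter via the nearest hundred k = (x+50)//100.
def pvNode (x y : Int) : String :=
  let k := PySem.Int.floordiv (x + 50) 100
  let letter :=
    if 1 ≤ k ∧ k ≤ 7 ∧ |x - 100 * k| < 10
    then String.ofList [Char.ofNat ('A'.toNat + (k - 1).toNat)] else ""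
  letter ++ PySem.Int.toStr (Int.tdiv y 100)

def label_missing_vertical_lines_alt (Lines : List (Int × List (Int × Int))) : List String :=
  Lines.flatMap (fun cm =>
    cm.2.map (fun g => pvNode cm.1 (g.1 + 10) ++ "-" ++ pvNode cm.1 (g.2 + 10)))

-- ===== PRECONDITION & SPEC =====
def Spec_label_missing_vertical_lines (Lines : List (Int × List (Int × Int))) (out : List String) : Prop := out = label_missing_vertical_lines_alt Lines
instance (Lines : List (Int × List (Int × Int))) (out : List String) : Decidable (Spec_label_missing_vertical_lines Lines out) := by unfold Spec_label_missing_vertical_lines; infer_instance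

-- ===== CLAIM (what is proved, stated in full; the proofs are below) =====
def Claim_equal_label_missing_vertical_lines : Prop := ∀ (Lines : List (Int × List (Int × Int))), Dom_label_missing_vertical_lines Lines → Spec_label_missing_vertical_lines Lines (label_missing_vertical_lines Lines)

-- ===== LEMMAS AND PROOFS =====

theorem pv_floordiv_eq (x q : Int) (h : q * 100 ≤ x + 50 ∧ x + 50 < (q + 1) * 100) :
    PySem.Int.floordiv (x + 50) 100 = q :=
  (PySem.Int.floordiv_eq_iff_of_pos (by norm_num)).mpr h

-- the two letter computations agree for every integer column
theorem pv_node_eq (x y : Int) : pvLabelNodes (x, y) = pvNode x y := by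
  unfold pvLabelNodes pvNode
  simp only []
  by_cases h1 : x = 100 ∨ (x > 90 ∧ x < 110)
  · rw [if_pos h1, pv_floordiv_eq x 1 (by omega),
      if_pos ⟨by norm_num, by norm_num, by rw [abs_lt]; omega⟩]; rfl
  rw [if_neg h1]
  by_cases h2 : x = 200 ∨ (x > 190 ∧ x < 210)
  · rw [if_pos h2, pv_floordiv_eq x 2 (by omega),
      if_pos ⟨by norm_num, by norm_num, by rw [abs_lt]; omega⟩]; rfl
  rw [if_neg h2]
  by_cases h3 : x = 300 ∨ (x > 290 ∧ x < 310)
  · rw [if_pos h3, pv_floordiv_eq x 3 (by omega),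
      if_pos ⟨by norm_num, by norm_num, by rw [abs_lt]; omega⟩]; rfl
  rw [if_neg h3]
  by_cases h4 : x = 400 ∨ (x > 390 ∧ x < 410)
  · rw [if_pos h4, pv_floordiv_eq x 4 (by omega),
      if_pos ⟨by norm_num, by norm_num, by rw [abs_lt]; omega⟩]; rfl
  rw [if_neg h4]
  by_cases h5 : x = 500 ∨ (x > 490 ∧ x < 510)
  · rw [if_pos h5, pv_floordiv_eq x 5 (by omega),
      if_pos ⟨by norm_num, by norm_num, by rw [abs_lt]; omega⟩]; rfl
  rw [if_neg h5]
  by_cases h6 : x = 600 ∨ (x > 590 ∧ x < 610)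
  · rw [if_pos h6, pv_floordiv_eq x 6 (by omega),
      if_pos ⟨by norm_num, by norm_num, by rw [abs_lt]; omega⟩]; rfl
  rw [if_neg h6]
  by_cases h7 : x = 700 ∨ (x > 690 ∧ x < 710)
  · rw [if_pos h7, pv_floordiv_eq x 7 (by omega),
      if_pos ⟨by norm_num, by norm_num, by rw [abs_lt]; omega⟩]; rfl
  rw [if_neg h7]
  have hb : PySem.Int.floordiv (x + 50) 100 * 100 ≤ x + 50 ∧
      x + 50 < (PySem.Int.floordiv (x + 50) 100 + 1) * 100 :=
    (PySem.Int.floordiv_eq_iff_of_pos (by norm_num)).mp rfl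
  rw [if_neg (by rintro ⟨hk1, hk7, habs⟩; rw [abs_lt] at habs; omega)]

-- ===== VERDICT (by name: the statement is the Claim_ definition above) =====
theorem label_missing_vertical_lines_spec : Claim_equal_label_missing_vertical_lines := by
  intro Lines _
  unfold Spec_label_missing_vertical_lines label_missing_vertical_lines
    label_missing_vertical_lines_alt
  simp only [pv_node_eq]
  rw [show (fun (ans : List String) (cm : Int × List (Int × Int)) =>
        cm.2.foldl (fun ans g =>
          ans ++ [pvNode cm.1 (g.1 + 10) ++ "-" ++ pvNode cm.1 (g.2 + 10)]) ans)
      = fun ans cm => ans ++ cm.2.map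
          (fun g => pvNode cm.1 (g.1 + 10) ++ "-" ++ pvNode cm.1 (g.2 + 10)) from
    funext fun ans => funext fun cm =>
      PySem.List.foldl_append_singleton_eq_map _ _ _]
  exact PySem.List.foldl_append_eq_flatMap _ _ _
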